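-- pv_equiv track=rewrite | github.com/GEOS-DEV/GEOS | benchmarks/runBenchmarks.py | getMostCubeLikeRepresentation
-- ===== SOURCE A (Python) =====
-- def getMostCubeLikeRepresentation( n ):
--     """
--     Of all possible boxes of integer dimensions and volume n return the dimensions of the most cube-like box.
--
--     Args:
--         n: The volume of the box.
--
--     Returns:
--         The dimensions of the most cube-like box returned as a triple.
--     """
--     minTriple = None
--     minSurfaceArea = 1e99
--     for i in range( 1, n + 1 ):
--         if n % i != 0:
--             continue
--
--         n_over_i = n // i
--         for j in range( 1, n_over_i + 1 ):
--             if n_over_i % j != 0: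
--                 continue
--
--             k = n_over_i // j
--             surfaceArea = 2 * i * j + 2 * i * k + 2 * j * k
--             if surfaceArea < minSurfaceArea:
--                 minSurfaceArea = surfaceArea
--                 minTriple = ( i, j, k )
--
--     return minTriple
-- ===== SOURCE B (Python) =====
-- def _divisors(m):
--     """All positive divisors of m >= 1 in increasing order, by trial division up to sqrt(m)."""
--     small = []
--     large = []
--     d = 1
--     while d * d <= m:
--         if m % d == 0:
--             small.append(d)
--             if d * d != m:
--                 large.append(m // d)
--         d += 1
--     large.reverse()
--     return small + large
--
-- def getMostCubeLikeRepresentation(n):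
--     if n < 1:
--         return None
--     best = None
--     for i in _divisors(n):
--         m = n // i
--         for j in _divisors(m):
--             k = m // j
--             sa = 2 * (i * j + i * k + j * k)
--             if best is None or sa < best[0]:
--                 best = (sa, (i, j, k))
--     return best[1] if best is not None else None
-- ===== Notes on version B (the rewrite author's own statement) =====
-- stated objective: faster
-- what changed: Instead of scanning every integer in 1..n and 1..n/i, B enumerates only the divisors of n (and of n/i) by trial division up to the square root, then scans those sorted divisor lists with the same strict-improvement minimum.
import Mathlib
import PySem

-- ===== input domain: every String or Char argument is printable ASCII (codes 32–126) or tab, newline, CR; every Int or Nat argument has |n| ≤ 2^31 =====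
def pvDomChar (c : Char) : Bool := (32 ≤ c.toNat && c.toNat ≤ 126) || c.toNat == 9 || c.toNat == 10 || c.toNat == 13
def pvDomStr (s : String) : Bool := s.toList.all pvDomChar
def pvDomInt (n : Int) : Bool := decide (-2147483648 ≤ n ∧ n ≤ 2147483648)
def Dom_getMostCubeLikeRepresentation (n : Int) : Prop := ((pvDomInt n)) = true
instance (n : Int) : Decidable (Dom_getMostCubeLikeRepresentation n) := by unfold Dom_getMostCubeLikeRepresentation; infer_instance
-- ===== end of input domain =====

-- B enumerates only the divisors of n (trial division up to √n) instead of scanning 1..n and 1..n/i; asymptotically faster, same result.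

-- ===== PORT A =====
-- A's initial minSurfaceArea is the float 1e99; on Dom every candidate surface area is an
-- integer < 6·2^93 < 1e99, so comparing with the Int sentinel 10^99 is exact here.
def getMostCubeLikeRepresentation (n : Int) : Option (List Int) :=
  let r := (PySem.List.pyRange 1 (n + 1) 1).foldl
    (fun (st : Option (Int × Int × Int) × Int) i =>
      if PySem.Int.mod n i ≠ 0 then st
      else
        let m := PySem.Int.floordiv n i
        (PySem.List.pyRange 1 (m + 1) 1).foldl
          (fun st2 j =>
            if PySem.Int.mod m j ≠ 0 then st2
            else
              let k := PySem.Int.floordiv m j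
              let sa := 2 * i * j + 2 * i * k + 2 * j * k
              if sa < st2.2 then (some (i, j, k), sa) else st2) st)
    (none, 10 ^ 99)
  r.1.map (fun t => [t.1, t.2.1, t.2.2])

-- ===== PORT B =====
-- while d * d <= m: collect d (and m // d) when d divides m; guard '1 ≤ d' only makes the recursion total
def pvDivLoop (m d : Int) (small large : List Int) : List Int × List Int :=
  if h : 1 ≤ d ∧ d * d ≤ m then
    if PySem.Int.mod m d = 0 then
      pvDivLoop m (d + 1) (small ++ [d])
        (if d * d ≠ m then large ++ [PySem.Int.floordiv m d] else large)
    else pvDivLoop m (d + 1) small large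
  else (small, large)
termination_by (m + 1 - d).toNat
decreasing_by
  all_goals
    have hd : d ≤ m := le_trans (le_mul_of_one_le_left (by omega) h.1) h.2
    omega

def pvDivisors (m : Int) : List Int :=
  let p := pvDivLoop m 1 [] []
  p.1 ++ p.2.reverse

def getMostCubeLikeRepresentation_alt (n : Int) : Option (List Int) :=
  if n < 1 then none
  else
    let best := (pvDivisors n).foldl
      (fun (best : Option (Int × (Int × Int × Int))) i =>
        let m := PySem.Int.floordiv n i
        (pvDivisors m).foldl
          (fun best2 j =>
            let k := PySem.Int.floordiv m j
            let sa := 2 * (i * j + i * k + j * k)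
            match best2 with
            | none => some (sa, (i, j, k))
            | some (s, t) => if sa < s then some (sa, (i, j, k)) else some (s, t)) best)
      none
    best.map (fun p => [p.2.1, p.2.2.1, p.2.2.2])

-- ===== PRECONDITION & SPEC =====
def Spec_getMostCubeLikeRepresentation (n : Int) (out : Option (List Int)) : Prop := out = getMostCubeLikeRepresentation_alt n
instance (n : Int) (out : Option (List Int)) : Decidable (Spec_getMostCubeLikeRepresentation n out) := by unfold Spec_getMostCubeLikeRepresentation; infer_instance

-- ===== CLAIM (what is proved, stated in full; the proofs are below) =====
def Claim_equal_getMostCubeLikeRepresentation : Prop := ∀ (n : Int), Dom_getMostCubeLikeRepresentation n → Spec_getMostCubeLikeRepresentation n (getMostCubeLikeRepresentation n)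

-- ===== LEMMAS AND PROOFS =====

def pvSq (m : Int) : Int := (Nat.sqrt m.toNat : Int)

lemma pvSq_spec (m : Int) (hm : 1 ≤ m) :
    pvSq m * pvSq m ≤ m ∧ m < (pvSq m + 1) * (pvSq m + 1) ∧ 1 ≤ pvSq m ∧ pvSq m ≤ m := by
  unfold pvSq
  have h0 : ((m.toNat : Int)) = m := by omega
  have h3 : Nat.sqrt m.toNat ≤ m.toNat := Nat.sqrt_le_self m.toNat
  have h4 : 1 ≤ Nat.sqrt m.toNat := by
    have h5 : (1 : Nat) ≤ m.toNat := by omega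
    calc 1 = Nat.sqrt 1 := by simp
    _ ≤ Nat.sqrt m.toNat := Nat.sqrt_le_sqrt h5
  refine ⟨?_, ?_, by exact_mod_cast h4, by omega⟩
  · have h1 : Nat.sqrt m.toNat * Nat.sqrt m.toNat ≤ m.toNat := by
      simpa [pow_two] using Nat.sqrt_le' m.toNat
    have h1' : ((Nat.sqrt m.toNat * Nat.sqrt m.toNat : Nat) : Int) ≤ ((m.toNat : Nat) : Int) := by
      exact_mod_cast h1
    push_cast at h1'; omega
  · have h2 : m.toNat < (Nat.sqrt m.toNat + 1) * (Nat.sqrt m.toNat + 1) := by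
      simpa [pow_two, Nat.succ_eq_add_one] using Nat.lt_succ_sqrt' m.toNat
    have h2' : ((m.toNat : Nat) : Int) < (((Nat.sqrt m.toNat + 1) * (Nat.sqrt m.toNat + 1) : Nat) : Int) := by
      exact_mod_cast h2
    push_cast at h2'; omega

def pvDiv (m : Int) : Int → Bool := fun i => decide (PySem.Int.mod m i = 0)

lemma pvDivLoop_spec (m : Int) (hm : 1 ≤ m) :
    ∀ (c : Nat) (d : Int) (small large : List Int), 1 ≤ d → (pvSq m + 1 - d).toNat = c →
      pvDivLoop m d small large =
        (small ++ (PySem.List.pyRange d (pvSq m + 1) 1).filter (pvDiv m),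
         large ++ ((PySem.List.pyRange d (pvSq m + 1) 1).filter
            (fun i => pvDiv m i && decide (i * i ≠ m))).map (fun i => m / i)) := by
  intro c
  induction c with
  | zero =>
    intro d small large hd1 hc
    obtain ⟨hs1, hs2, hs3, hs4⟩ := pvSq_spec m hm
    have hds : pvSq m + 1 ≤ d := by omega
    have hnot : ¬ (1 ≤ d ∧ d * d ≤ m) := by
      rintro ⟨-, hdd⟩
      have : (pvSq m + 1) * (pvSq m + 1) ≤ d * d := mul_le_mul hds hds (by omega) (by omega)
      omega
    rw [pvDivLoop, dif_neg hnot, PySem.List.pyRange_one_eq_nil hds]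
    simp
  | succ c ih =>
    intro d small large hd1 hc
    obtain ⟨hs1, hs2, hs3, hs4⟩ := pvSq_spec m hm
    have hds : d ≤ pvSq m := by omega
    have hdd : d * d ≤ m := le_trans (mul_le_mul hds hds (by omega) (by omega)) hs1
    have hdpos : (0:Int) < d := by omega
    rw [pvDivLoop, dif_pos ⟨hd1, hdd⟩,
        PySem.List.pyRange_one_cons (by omega : d < pvSq m + 1)]
    by_cases hmod : PySem.Int.mod m d = 0
    · rw [if_pos hmod, PySem.Int.floordiv_eq_ediv_of_pos hdpos]
      rw [ih (d+1) _ _ (by omega) (by omega)]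
      by_cases hsq : d * d ≠ m
      · rw [if_pos hsq]
        simp [pvDiv, hmod, hsq]
      · rw [if_neg hsq]
        push Not at hsq
        simp [pvDiv, hmod, hsq]
    · rw [if_neg hmod]
      rw [ih (d+1) _ _ (by omega) (by omega)]
      simp [pvDiv, hmod]

lemma pvDivisors_eq (m : Int) (hm : 1 ≤ m) :
    pvDivisors m = (PySem.List.pyRange 1 (m + 1) 1).filter (pvDiv m) := by
  obtain ⟨hs1, hs2, hs3, hs4⟩ := pvSq_spec m hm
  have hloop := pvDivLoop_spec m hm ((pvSq m + 1 - 1).toNat) 1 [] [] le_rfl rfl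
  unfold pvDivisors
  rw [hloop]; simp only [List.nil_append]
  rw [PySem.List.pyRange_one_append 1 (pvSq m + 1) (m + 1) (by omega) (by omega),
      List.filter_append]
  congr 1
  -- memberships
  have hSq_mem : ∀ i : Int,
      i ∈ (PySem.List.pyRange 1 (pvSq m + 1) 1).filter (fun i => pvDiv m i && decide (i * i ≠ m)) ↔
        1 ≤ i ∧ i ≤ pvSq m ∧ i ∣ m ∧ i * i ≠ m := by
    intro i
    simp [List.mem_filter, PySem.List.mem_pyRange_one, pvDiv, PySem.Int.mod_eq_zero_iff_dvd]
    tauto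
  have hT_mem : ∀ x : Int,
      x ∈ (PySem.List.pyRange (pvSq m + 1) (m + 1) 1).filter (pvDiv m) ↔
        pvSq m + 1 ≤ x ∧ x ≤ m ∧ x ∣ m := by
    intro x
    simp [List.mem_filter, PySem.List.mem_pyRange_one, pvDiv, PySem.Int.mod_eq_zero_iff_dvd]
    tauto
  have hq : ∀ {i : Int}, 1 ≤ i → i ∣ m → i * (m / i) = m := fun hi hd => Int.mul_ediv_cancel' hd
  have hqpos : ∀ {i : Int}, 1 ≤ i → i ∣ m → 1 ≤ m / i := by
    intro i hi hd
    have h := hq hi hd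
    by_contra hc
    push Not at hc
    nlinarith
  -- forward: each mapped element lands in T
  have hfwd : ∀ i : Int, 1 ≤ i → i ≤ pvSq m → i ∣ m → i * i ≠ m →
      pvSq m + 1 ≤ m / i ∧ m / i ≤ m ∧ m / i ∣ m := by
    intro i h1 h2 h3 h4
    have he := hq h1 h3
    have hp := hqpos h1 h3
    refine ⟨?_, Int.ediv_le_self i (by omega), Dvd.intro_left i he⟩
    by_contra hc
    push Not at hc
    have hxle : m / i ≤ pvSq m := by omega
    have h5 : m ≤ pvSq m * pvSq m := by nlinarith
    have hm2 : m = pvSq m * pvSq m := le_antisymm h5 hs1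
    have hxm : m / i = pvSq m := le_antisymm hxle (by nlinarith)
    have him : i = pvSq m := le_antisymm h2 (by nlinarith)
    exact h4 (by rw [him, ← hm2])
  -- backward: each element of T is m / i for a unique small divisor i
  have hbwd : ∀ x : Int, pvSq m + 1 ≤ x → x ≤ m → x ∣ m →
      1 ≤ m / x ∧ m / x ≤ pvSq m ∧ m / x ∣ m ∧ (m / x) * (m / x) ≠ m ∧ m / (m / x) = x := by
    intro x h1 h2 h3
    have hx1 : 1 ≤ x := by omega
    have he := hq hx1 h3
    have hp := hqpos hx1 h3
    have hile : m / x ≤ pvSq m := by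
      by_contra hc
      push Not at hc
      nlinarith
    have hidvd : m / x ∣ m := Dvd.intro_left x he
    have hne : (m / x) * (m / x) ≠ m := by
      intro hsq
      have hxx : m / x = x := mul_right_cancel₀ (by omega) (hsq.trans he.symm)
      omega
    refine ⟨hp, hile, hidvd, hne, ?_⟩
    have he2 := hq hp hidvd
    exact mul_left_cancel₀ (by omega) (he2.trans (by rw [mul_comm]; exact he.symm))
  -- pairwise facts
  have hSq_pair : ((PySem.List.pyRange 1 (pvSq m + 1) 1).filter
      (fun i => pvDiv m i && decide (i * i ≠ m))).Pairwise (· < ·) :=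
    (PySem.List.pairwise_lt_pyRange_one _ _).sublist List.filter_sublist
  have hT_pair : ((PySem.List.pyRange (pvSq m + 1) (m + 1) 1).filter (pvDiv m)).Pairwise (· < ·) :=
    (PySem.List.pairwise_lt_pyRange_one _ _).sublist List.filter_sublist
  have hrev_pair : (((PySem.List.pyRange 1 (pvSq m + 1) 1).filter
      (fun i => pvDiv m i && decide (i * i ≠ m))).map (fun i => m / i)).reverse.Pairwise (· < ·) := by
    rw [List.pairwise_reverse, List.pairwise_map]
    refine List.Pairwise.imp_of_mem ?_ hSq_pair
    intro a b ha hb hab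
    obtain ⟨ha1, ha2, ha3, ha4⟩ := (hSq_mem a).1 ha
    obtain ⟨hb1, hb2, hb3, hb4⟩ := (hSq_mem b).1 hb
    have hea := hq ha1 ha3
    have heb := hq hb1 hb3
    have hpa := hqpos ha1 ha3
    have hpb := hqpos hb1 hb3
    by_contra hc
    push Not at hc
    nlinarith
  -- same membership
  have hmem : ∀ x : Int,
      x ∈ (((PySem.List.pyRange 1 (pvSq m + 1) 1).filter
        (fun i => pvDiv m i && decide (i * i ≠ m))).map (fun i => m / i)).reverse ↔
      x ∈ (PySem.List.pyRange (pvSq m + 1) (m + 1) 1).filter (pvDiv m) := by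
    intro x
    rw [List.mem_reverse, List.mem_map, hT_mem]
    constructor
    · rintro ⟨i, hi, rfl⟩
      obtain ⟨h1, h2, h3, h4⟩ := (hSq_mem i).1 hi
      exact hfwd i h1 h2 h3 h4
    · rintro ⟨h1, h2, h3⟩
      obtain ⟨g1, g2, g3, g4, g5⟩ := hbwd x h1 h2 h3
      exact ⟨m / x, (hSq_mem _).2 ⟨g1, g2, g3, g4⟩, g5⟩
  -- conclude
  exact List.Perm.eq_of_pairwise (fun a b _ _ u v => absurd u (not_lt.2 v.le))
    hrev_pair hT_pair
    ((List.perm_ext_iff_of_nodup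
      (hrev_pair.imp (fun h => ne_of_lt h)) (hT_pair.imp (fun h => ne_of_lt h))).mpr hmem)

def pvRel (a : Option (Int × Int × Int) × Int) (b : Option (Int × (Int × Int × Int))) : Prop :=
  (a = (none, 10 ^ 99) ∧ b = none) ∨ (∃ s t, a = (some t, s) ∧ b = some (s, t) ∧ s < 10 ^ 99)

lemma pvRel_inner (n i m : Int) (hn : n ≤ 2 ^ 31) (hi2 : i ≤ n)
    (hm1 : 1 ≤ m) (hm2 : m ≤ n) (L : List Int) (hL : ∀ j ∈ L, 1 ≤ j ∧ j ≤ m) :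
    ∀ a b, pvRel a b →
      pvRel (L.foldl (fun st2 j =>
              let k := PySem.Int.floordiv m j
              let sa := 2 * i * j + 2 * i * k + 2 * j * k
              if sa < st2.2 then (some (i, j, k), sa) else st2) a)
            (L.foldl (fun best2 j =>
              let k := PySem.Int.floordiv m j
              let sa := 2 * (i * j + i * k + j * k)
              match best2 with
              | none => some (sa, (i, j, k))
              | some (s, t) => if sa < s then some (sa, (i, j, k)) else some (s, t)) b) := by
  induction L with
  | nil => intro a b hab; exact hab
  | cons j L ih =>
    intro a b hab
    obtain ⟨hj1, hj2⟩ := hL j (by simp)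
    simp only [List.foldl_cons]
    apply ih (fun x hx => hL x (by simp [hx]))
    -- one step preserves the relation
    rw [PySem.Int.floordiv_eq_ediv_of_pos (by omega : (0:Int) < j)]
    set k := m / j with hk
    have hk0 : 0 ≤ k := Int.ediv_nonneg (by omega) (by omega)
    have hkm : k ≤ m := Int.ediv_le_self j (by omega)
    have hN : (0:Int) ≤ 2 ^ 31 := by norm_num
    have h1 : i * j ≤ 2 ^ 31 * 2 ^ 31 :=
      mul_le_mul (by omega) (by omega) (by omega) hN
    have h2 : i * k ≤ 2 ^ 31 * 2 ^ 31 :=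
      mul_le_mul (by omega) (by omega) hk0 hN
    have h3 : j * k ≤ 2 ^ 31 * 2 ^ 31 :=
      mul_le_mul (by omega) (by omega) hk0 hN
    have hsa : 2 * i * j + 2 * i * k + 2 * j * k < 10 ^ 99 := by nlinarith
    have hring : 2 * (i * j + i * k + j * k) = 2 * i * j + 2 * i * k + 2 * j * k := by ring
    rcases hab with ⟨ha, hb⟩ | ⟨s, t, ha, hb, hslt⟩
    · subst ha; subst hb
      simp only [hring]
      rw [if_pos (by simpa using hsa)]
      exact Or.inr ⟨_, _, rfl, rfl, hsa⟩
    · subst ha; subst hb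
      simp only [hring]
      by_cases hlt : 2 * i * j + 2 * i * k + 2 * j * k < s
      · rw [if_pos hlt, if_pos hlt]
        exact Or.inr ⟨_, _, rfl, rfl, hsa⟩
      · rw [if_neg hlt, if_neg hlt]
        exact Or.inr ⟨_, _, rfl, rfl, hslt⟩

lemma pvRel_outer (n : Int) (hn1 : 1 ≤ n) (hn2 : n ≤ 2 ^ 31) (L : List Int)
    (hL : ∀ i ∈ L, 1 ≤ i ∧ i ≤ n ∧ i ∣ n) :
    ∀ a b, pvRel a b →
      pvRel (L.foldl (fun st i =>
              let m := PySem.Int.floordiv n i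
              (PySem.List.pyRange 1 (m + 1) 1).foldl
                (fun st2 j =>
                  if PySem.Int.mod m j ≠ 0 then st2
                  else
                    let k := PySem.Int.floordiv m j
                    let sa := 2 * i * j + 2 * i * k + 2 * j * k
                    if sa < st2.2 then (some (i, j, k), sa) else st2) st) a)
            (L.foldl (fun best i =>
              let m := PySem.Int.floordiv n i
              (pvDivisors m).foldl
                (fun best2 j =>
                  let k := PySem.Int.floordiv m j
                  let sa := 2 * (i * j + i * k + j * k)
                  match best2 with
                  | none => some (sa, (i, j, k))
                  | some (s, t) => if sa < s then some (sa, (i, j, k)) else some (s, t)) best) b) := by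
  induction L with
  | nil => intro a b hab; exact hab
  | cons i L ih =>
    intro a b hab
    obtain ⟨hi1, hi2, hidvd⟩ := hL i (by simp)
    simp only [List.foldl_cons]
    apply ih (fun x hx => hL x (by simp [hx]))
    rw [PySem.Int.floordiv_eq_ediv_of_pos (by omega : (0:Int) < i)]
    set m := n / i with hm
    have hq : i * m = n := Int.mul_ediv_cancel' hidvd
    have hm1 : 1 ≤ m := by nlinarith [hq]
    have hm2 : m ≤ n := Int.ediv_le_self i (by omega)
    -- A's inner skip-loop is the plain loop over the filtered range
    have hskip :
        (PySem.List.pyRange 1 (m + 1) 1).foldl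
          (fun st2 j =>
            if PySem.Int.mod m j ≠ 0 then st2
            else
              let k := PySem.Int.floordiv m j
              let sa := 2 * i * j + 2 * i * k + 2 * j * k
              if sa < st2.2 then (some (i, j, k), sa) else st2) a =
        ((PySem.List.pyRange 1 (m + 1) 1).filter (pvDiv m)).foldl
          (fun st2 j =>
            let k := PySem.Int.floordiv m j
            let sa := 2 * i * j + 2 * i * k + 2 * j * k
            if sa < st2.2 then (some (i, j, k), sa) else st2) a := by
      rw [List.foldl_filter]
      simp only [pvDiv, decide_eq_true_eq, ne_eq, ite_not]
    rw [hskip, pvDivisors_eq m hm1]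
    apply pvRel_inner n i m hn2 hi2 hm1 hm2 _ _ _ _ hab
    intro j hj
    rw [List.mem_filter, PySem.List.mem_pyRange_one] at hj
    omega

-- ===== VERDICT (by name: the statement is the Claim_ definition above) =====
theorem getMostCubeLikeRepresentation_spec : Claim_equal_getMostCubeLikeRepresentation := by
  intro n hdom
  unfold Dom_getMostCubeLikeRepresentation pvDomInt at hdom
  have hn2 : n ≤ 2 ^ 31 := by simpa using (of_decide_eq_true hdom).2
  unfold Spec_getMostCubeLikeRepresentation getMostCubeLikeRepresentation getMostCubeLikeRepresentation_alt
  by_cases hn : n < 1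
  · rw [if_pos hn, PySem.List.pyRange_one_eq_nil (by omega)]
    simp
  · rw [if_neg hn]
    have hn1 : (1:Int) ≤ n := by omega
    -- A's outer skip-loop is the plain loop over the filtered range
    have hskip :
        (PySem.List.pyRange 1 (n + 1) 1).foldl
          (fun (st : Option (Int × Int × Int) × Int) i =>
            if PySem.Int.mod n i ≠ 0 then st
            else
              let m := PySem.Int.floordiv n i
              (PySem.List.pyRange 1 (m + 1) 1).foldl
                (fun st2 j =>
                  if PySem.Int.mod m j ≠ 0 then st2
                  else
                    let k := PySem.Int.floordiv m j
                    let sa := 2 * i * j + 2 * i * k + 2 * j * k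
                    if sa < st2.2 then (some (i, j, k), sa) else st2) st) (none, 10 ^ 99) =
        ((PySem.List.pyRange 1 (n + 1) 1).filter (pvDiv n)).foldl
          (fun st i =>
            let m := PySem.Int.floordiv n i
            (PySem.List.pyRange 1 (m + 1) 1).foldl
              (fun st2 j =>
                if PySem.Int.mod m j ≠ 0 then st2
                else
                  let k := PySem.Int.floordiv m j
                  let sa := 2 * i * j + 2 * i * k + 2 * j * k
                  if sa < st2.2 then (some (i, j, k), sa) else st2) st) (none, 10 ^ 99) := by
      rw [List.foldl_filter]
      simp only [pvDiv, decide_eq_true_eq, ne_eq, ite_not]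
    rw [hskip, ← pvDivisors_eq n hn1]
    have hrel := pvRel_outer n hn1 hn2 (pvDivisors n)
      (by
        intro x hx
        rw [pvDivisors_eq n hn1, List.mem_filter, PySem.List.mem_pyRange_one] at hx
        obtain ⟨⟨hx1, hx2⟩, hx3⟩ := hx
        refine ⟨hx1, by omega, ?_⟩
        exact (PySem.Int.mod_eq_zero_iff_dvd n x).1 (of_decide_eq_true hx3))
      (none, 10 ^ 99) none (Or.inl ⟨rfl, rfl⟩)
    rcases hrel with ⟨ha, hb⟩ | ⟨s, t, ha, hb, -⟩ <;> rw [ha, hb] <;> simp
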